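-- pv_equiv track=rewrite | github.com/trhys/tube_defect_analyzer | src/analyzer/analyze_time_diff.py | analyze_time_diff
-- ===== SOURCE A (Python) =====
-- DEFECT_WINDOW = 2 #minutes
--
-- def analyze_time_diff(data):
--     if data is None:
--         return None
--     if len(data) == 0:
--         raise ValueError("data should not be empty!")
--     groups = []
--     current = []
--     for i in range(len(data) -1):
--         stamp1, stamp2 = data[i], data[i+1]
--         hour1, minute1 = map(int, stamp1[0].split(":"))
--         hour2, minute2 = map(int, stamp2[0].split(":"))
--         time1 = hour1 * 60 + minute1
--         time2 = hour2 * 60 + minute2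
--         delta_time = (time2 - time1) % 1440
--         if delta_time <= DEFECT_WINDOW or delta_time >= 1440 - DEFECT_WINDOW:
--             if current:
--                 current.append(stamp2)
--             else:
--                 current = [stamp1, stamp2]
--         else:
--             if len(current) > 1:
--                 groups.append(current)
--             current = []
--     if len(current) > 1:
--         groups.append(current)
--     return groups
-- ===== SOURCE B (Python) =====
-- DEFECT_WINDOW = 2  # minutes
--
--
-- def analyze_time_diff(data):
--     if data is None:
--         return None
--     if len(data) == 0:
--         raise ValueError("data should not be empty!")
--     # pass 1: adjacency flags for each consecutive pair
--     adj = [_pair_close(data[i], data[i + 1]) for i in range(len(data) - 1)]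
--     # pass 2: maximal runs of True adjacency -> slices of data
--     groups = []
--     i = 0
--     n = len(adj)
--     while i < n:
--         if adj[i]:
--             j = i
--             while j < n and adj[j]:
--                 j += 1
--             groups.append(data[i:j + 1])
--             i = j
--         else:
--             i += 1
--     return groups
--
--
-- def _pair_close(stamp1, stamp2):
--     hour1, minute1 = map(int, stamp1[0].split(":"))
--     hour2, minute2 = map(int, stamp2[0].split(":"))
--     delta = ((hour2 * 60 + minute2) - (hour1 * 60 + minute1)) % 1440
--     return delta <= DEFECT_WINDOW or delta >= 1440 - DEFECT_WINDOW
-- ===== Notes on version B (the rewrite author's own statement) =====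
-- stated objective: alternative
-- what changed: B replaces A's single stateful loop with a growing `current` accumulator by two passes: first a list of adjacency flags for consecutive pairs, then a scan extracting maximal runs of True flags as slices of data.
import Mathlib
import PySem

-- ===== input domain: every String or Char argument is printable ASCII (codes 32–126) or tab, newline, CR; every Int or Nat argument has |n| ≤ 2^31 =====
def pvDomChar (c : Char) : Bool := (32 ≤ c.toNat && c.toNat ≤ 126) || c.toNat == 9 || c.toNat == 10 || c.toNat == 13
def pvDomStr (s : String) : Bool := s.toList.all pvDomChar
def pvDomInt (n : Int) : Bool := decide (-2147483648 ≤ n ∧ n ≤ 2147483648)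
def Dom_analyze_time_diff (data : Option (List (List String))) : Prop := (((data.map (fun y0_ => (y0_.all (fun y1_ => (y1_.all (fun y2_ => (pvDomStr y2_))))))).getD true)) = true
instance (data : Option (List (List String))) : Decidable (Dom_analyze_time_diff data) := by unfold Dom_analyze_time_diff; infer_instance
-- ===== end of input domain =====

-- B recomputes the result in two passes (adjacency flags over consecutive pairs, then maximal runs of
-- True flags emitted as slices of data) instead of A's single loop with a growing `current` accumulator;
-- objective: alternative decomposition, same asymptotic cost.

-- ===== PORT A =====
-- stamp[0].split(":") parsed by map(int, …) and combined to hour*60+minute; none = the IndexError/ValueError path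
def pvToMin (stamp : List String) : Option Int :=
  match PySem.List.pyGet? stamp 0 with
  | none => none
  | some s =>
    match ((PySem.Str.split? s ":").getD []).map PySem.Int.ofStr? with
    | [some h, some m] => some (h * 60 + m)
    | _ => none

-- one iteration of A's for-loop; state = (groups, current); none = an exception was raised
def pvStepA (l : List (List String)) (st : Option (List (List (List String)) × List (List String))) (i : Nat) :
    Option (List (List (List String)) × List (List String)) :=
  match st with
  | none => none
  | some (groups, current) =>
    match l[i]?, l[i+1]? with
    | some stamp1, some stamp2 =>
      match pvToMin stamp1, pvToMin stamp2 with
      | some time1, some time2 =>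
        let delta := PySem.Int.mod (time2 - time1) 1440
        if delta ≤ 2 ∨ 1440 - 2 ≤ delta then
          if current ≠ [] then some (groups, current ++ [stamp2])
          else some (groups, [stamp1, stamp2])
        else
          if 1 < current.length then some (groups ++ [current], [])
          else some (groups, [])
      | _, _ => none
    | _, _ => none

def analyze_time_diff (data : Option (List (List String))) : Option (List (List (List String))) :=
  match data with
  | none => none
  | some l =>
    if l.length = 0 then none   -- raise ValueError
    else
      match (List.range (l.length - 1)).foldl (pvStepA l) (some ([], [])) with
      | none => none            -- an exception inside the loop
      | some (groups, current) =>
        some (if 1 < current.length then groups ++ [current] else groups)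

-- ===== PORT B =====
-- _pair_close(data[i], data[i+1]); none = an exception
def pvAdj? (l : List (List String)) (i : Nat) : Option Bool :=
  match l[i]?, l[i+1]? with
  | some stamp1, some stamp2 =>
    match pvToMin stamp1, pvToMin stamp2 with
    | some t1, some t2 =>
      some (decide (PySem.Int.mod (t2 - t1) 1440 ≤ 2 ∨ 1440 - 2 ≤ PySem.Int.mod (t2 - t1) 1440))
    | _, _ => none
  | _, _ => none

-- the list comprehension building adj (stops at the first exception, like Python)
def pvMapO (f : Nat → Option Bool) : List Nat → Option (List Bool)
  | [] => some []
  | i :: is =>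
    match f i, pvMapO f is with
    | some b, some bs => some (b :: bs)
    | _, _ => none

-- inner while loop: advance j while j < n and adj[j]
def pvFindRunEnd (adj : List Bool) (j : Nat) : Nat :=
  if h : j < adj.length then
    if adj[j] then pvFindRunEnd adj (j+1) else j
  else j
termination_by adj.length - j

theorem pvFindRunEnd_ge (adj : List Bool) (j : Nat) : j ≤ pvFindRunEnd adj j := by
  fun_induction pvFindRunEnd adj j <;> omega

theorem pvFindRunEnd_gt (adj : List Bool) (i : Nat) (h : i < adj.length) (hb : adj[i] = true) :
    i < pvFindRunEnd adj i := by
  rw [pvFindRunEnd]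
  simp only [h, hb, dif_pos, if_pos]
  have := pvFindRunEnd_ge adj (i+1)
  omega

-- outer while loop over i: emit data[i:j+1] for each maximal run of adjacency flags
def pvScan (l : List (List String)) (adj : List Bool) (i : Nat) : List (List (List String)) :=
  if h : i < adj.length then
    if hb : adj[i] = true then
      PySem.List.slice l (some (i : Int)) (some ((pvFindRunEnd adj i : Int) + 1)) :: pvScan l adj (pvFindRunEnd adj i)
    else pvScan l adj (i+1)
  else []
termination_by adj.length - i
decreasing_by
  · have := pvFindRunEnd_gt adj i h hb; omega
  · omega

def analyze_time_diff_alt (data : Option (List (List String))) : Option (List (List (List String))) :=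
  match data with
  | none => none
  | some l =>
    if l.length = 0 then none   -- raise ValueError
    else
      match pvMapO (pvAdj? l) (List.range (l.length - 1)) with
      | none => none            -- an exception while building adj
      | some adj => some (pvScan l adj 0)

-- ===== PRECONDITION & SPEC =====
-- row has a first element of the exact shape the loop parses: split on ":" gives two int()-parsable pieces
def pvRowOk (row : List String) : Bool :=
  match row with
  | [] => false
  | s :: _ =>
    match ((PySem.Str.split? s ":").getD []).map PySem.Int.ofStr? with
    | [some _, some _] => true
    | _ => false

-- Pre_ excludes exactly the inputs on which A raises: the empty list (ValueError), and, when the loop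
-- runs at all (length ≥ 2), any row that is empty (IndexError) or whose first entry is not "int:int" (ValueError).
def Pre_analyze_time_diff (data : Option (List (List String))) : Prop :=
  match data with
  | none => True
  | some l => l ≠ [] ∧ (2 ≤ l.length → ∀ row ∈ l, pvRowOk row = true)

instance (data : Option (List (List String))) : Decidable (Pre_analyze_time_diff data) := by
  unfold Pre_analyze_time_diff; cases data <;> infer_instance

def pvWitness_analyze_time_diff : Option (List (List String)) :=
  some [["10:00", "a"], ["10:01", "b"], ["11:30", "c"]]

def Spec_analyze_time_diff (data : Option (List (List String))) (out : Option (List (List (List String)))) : Prop := out = analyze_time_diff_alt data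
instance (data : Option (List (List String))) (out : Option (List (List (List String)))) : Decidable (Spec_analyze_time_diff data out) := by unfold Spec_analyze_time_diff; infer_instance

-- ===== CLAIM (what is proved, stated in full; the proofs are below) =====
def Claim_equal_analyze_time_diff : Prop := ∀ (data : Option (List (List String))), Dom_analyze_time_diff data → Pre_analyze_time_diff data → Spec_analyze_time_diff data (analyze_time_diff data)

-- ===== LEMMAS AND PROOFS =====

-- proof-side abbreviations
def pvRow (l : List (List String)) (i : Nat) : List String := l[i]?.getD []
def pvT (l : List (List String)) (i : Nat) : Int := (pvToMin (pvRow l i)).getD 0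
def pvClose (l : List (List String)) (i : Nat) : Bool :=
  decide (PySem.Int.mod (pvT l (i+1) - pvT l i) 1440 ≤ 2 ∨ 1440 - 2 ≤ PySem.Int.mod (pvT l (i+1) - pvT l i) 1440)
def pvAdjL (l : List (List String)) : List Bool := (List.range (l.length - 1)).map (pvClose l)
def pvAssemble (st : Option (List (List (List String)) × List (List String))) : Option (List (List (List String))) :=
  match st with
  | none => none
  | some (g, c) => some (if 1 < c.length then g ++ [c] else g)

-- the value of the rest of A's loop from index i with current = c (groups accumulated separately)
def pvF (l : List (List String)) (n1 i : Nat) (c : List (List String)) : List (List (List String)) :=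
  if _h : i < n1 then
    if pvClose l i then
      pvF l n1 (i+1) (if c = [] then [pvRow l i, pvRow l (i+1)] else c ++ [pvRow l (i+1)])
    else
      (if 1 < c.length then [c] else []) ++ pvF l n1 (i+1) []
  else (if 1 < c.length then [c] else [])
termination_by n1 - i

theorem pv_rowOk_toMin (row : List String) (h : pvRowOk row = true) :
    pvToMin row = some ((pvToMin row).getD 0) := by
  cases row with
  | nil => simp [pvRowOk] at h
  | cons s rest =>
    have hg : PySem.List.pyGet? (s :: rest) 0 = some s := by
      simp [PySem.List.pyGet?, PySem.List.pyIdx?]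
    simp only [pvToMin, hg]
    simp only [pvRowOk] at h
    split at h
    · rename_i h1 m1 hm
      simp [hm]
    · exact absurd h (by simp)


theorem pv_hOk (l : List (List String)) (hpre : ∀ row ∈ l, pvRowOk row = true)
    (j : Nat) (hj : j < l.length) : pvToMin (pvRow l j) = some (pvT l j) := by
  have hmem : l[j] ∈ l := List.getElem_mem hj
  have hrow : pvRow l j = l[j] := by simp [pvRow, List.getElem?_eq_getElem hj]
  have h := pv_rowOk_toMin (pvRow l j) (by rw [hrow]; exact hpre _ hmem)
  rw [h]
  rfl


theorem pv_stepA_some (l : List (List String))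
    (hOk : ∀ j, j < l.length → pvToMin (pvRow l j) = some (pvT l j))
    (i : Nat) (hi : i + 1 < l.length) (g : List (List (List String))) (c : List (List String)) :
    pvStepA l (some (g, c)) i =
      (if pvClose l i then
        (if c = [] then some (g, [pvRow l i, pvRow l (i+1)]) else some (g, c ++ [pvRow l (i+1)]))
      else
        (if 1 < c.length then some (g ++ [c], []) else some (g, []))) := by
  have hil : i < l.length := by omega
  have h1 : l[i]? = some (pvRow l i) := by simp [pvRow, List.getElem?_eq_getElem hil]
  have h2 : l[i+1]? = some (pvRow l (i+1)) := by simp [pvRow, List.getElem?_eq_getElem hi]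
  simp only [pvStepA, h1, h2, hOk i hil, hOk (i+1) hi]
  by_cases hc : (PySem.Int.mod (pvT l (i+1) - pvT l i) 1440 ≤ 2 ∨ (1440:Int) - 2 ≤ PySem.Int.mod (pvT l (i+1) - pvT l i) 1440)
  · have hcl : pvClose l i = true := by unfold pvClose; exact decide_eq_true hc
    rw [if_pos hc, hcl]
    by_cases hce : c = [] <;> simp [hce]
  · have hcl : pvClose l i = false := by unfold pvClose; exact decide_eq_false hc
    rw [if_neg hc, hcl]
    simp


theorem pv_foldA (l : List (List String))
    (hOk : ∀ j, j < l.length → pvToMin (pvRow l j) = some (pvT l j))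
    (n1 : Nat) (hn1 : n1 + 1 = l.length) :
    ∀ k i g c, i + k = n1 →
      pvAssemble ((List.range' i k).foldl (pvStepA l) (some (g, c))) = some (g ++ pvF l n1 i c) := by
  intro k
  induction k with
  | zero =>
    intro i g c hik
    have : ¬ i < n1 := by omega
    rw [pvF]
    simp only [List.range', List.foldl_nil, pvAssemble, this, dif_neg, not_false_iff]
    split_ifs <;> simp
  | succ k ih =>
    intro i g c hik
    have hi1 : i + 1 < l.length := by omega
    rw [List.range'_succ, List.foldl_cons, pv_stepA_some l hOk i hi1 g c]
    rw [pvF]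
    have hilt : i < n1 := by omega
    by_cases hc : pvClose l i = true
    · simp only [hc, if_true, dif_pos hilt]
      by_cases hce : c = []
      · simp only [hce, if_pos rfl, if_pos]
        exact ih (i+1) g [pvRow l i, pvRow l (i+1)] (by omega)
      · simp only [if_neg hce]
        exact ih (i+1) g (c ++ [pvRow l (i+1)]) (by omega)
    · simp only [hc, if_false, dif_pos hilt, Bool.false_eq_true]
      by_cases hlc : 1 < c.length
      · simp only [if_pos hlc]
        rw [ih (i+1) (g ++ [c]) [] (by omega)]
        simp
      · simp only [if_neg hlc]
        rw [ih (i+1) g [] (by omega)]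
        simp


theorem pv_adj_some (l : List (List String))
    (hOk : ∀ j, j < l.length → pvToMin (pvRow l j) = some (pvT l j))
    (i : Nat) (hi : i + 1 < l.length) : pvAdj? l i = some (pvClose l i) := by
  have hil : i < l.length := by omega
  have h1 : l[i]? = some (pvRow l i) := by simp [pvRow, List.getElem?_eq_getElem hil]
  have h2 : l[i+1]? = some (pvRow l (i+1)) := by simp [pvRow, List.getElem?_eq_getElem hi]
  simp only [pvAdj?, h1, h2, hOk i hil, hOk (i+1) hi, pvClose]


theorem pv_mapO (l : List (List String)) (xs : List Nat)
    (h : ∀ i ∈ xs, pvAdj? l i = some (pvClose l i)) :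
    pvMapO (pvAdj? l) xs = some (xs.map (pvClose l)) := by
  induction xs with
  | nil => simp [pvMapO]
  | cons x xs ih =>
    simp only [pvMapO, h x (by simp), ih (fun i hi => h i (by simp [hi])), List.map_cons]


theorem pv_adjL_length (l : List (List String)) : (pvAdjL l).length = l.length - 1 := by
  simp [pvAdjL]

theorem pv_adjL_get (l : List (List String)) (j : Nat) (h : j < l.length - 1) :
    (pvAdjL l)[j]'(by simp [pvAdjL]; omega) = pvClose l j := by
  simp [pvAdjL]

theorem pv_slice_nat (l : List (List String)) (i j : Nat) :
    PySem.List.slice l (some (i : Int)) (some ((j : Int) + 1)) = (l.drop i).take (j + 1 - i) := by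
  have h := PySem.List.slice_natCast l i (j+1)
  push_cast at h
  rw [h]

theorem pv_GH (l : List (List String)) (n1 : Nat) (hn1 : n1 + 1 = l.length) :
    ∀ d i, n1 - i = d → i ≤ n1 →
      (pvF l n1 i [] = pvScan l (pvAdjL l) i ∧
       ∀ c, 2 ≤ c.length →
         pvF l n1 i c =
           (c ++ (l.drop (i+1)).take (pvFindRunEnd (pvAdjL l) i + 1 - (i+1))) ::
             pvScan l (pvAdjL l) (pvFindRunEnd (pvAdjL l) i)) := by
  intro d
  induction d with
  | zero =>
    intro i hd hle
    have hin : i = n1 := by omega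
    subst hin
    have hnlt : ¬ i < (pvAdjL l).length := by rw [pv_adjL_length]; omega
    constructor
    · rw [pvF, pvScan]
      simp [hnlt]
    · intro c hc
      have he : pvFindRunEnd (pvAdjL l) i = i := by
        rw [pvFindRunEnd]; simp [hnlt]
      rw [pvF, pvScan, he]
      simp only [hnlt, dif_neg, not_false_iff]
      have : i + 1 - (i + 1) = 0 := by omega
      simp [show ¬ i < i from by omega, this, show 1 < c.length from by omega]
  | succ d ih =>
    intro i hd hle
    have hilt : i < n1 := by omega
    have hadjlen : i < (pvAdjL l).length := by rw [pv_adjL_length]; omega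
    have hgi : (pvAdjL l)[i]'hadjlen = pvClose l i := pv_adjL_get l i (by omega)
    have hi1 : i + 1 < l.length := by omega
    obtain ⟨ihG, ihH⟩ := ih (i+1) (by omega) (by omega)
    have hrow1 : l.drop (i+1) = l[i+1] :: l.drop (i+2) := List.drop_eq_getElem_cons hi1
    have hrow0 : l.drop i = l[i] :: l.drop (i+1) := List.drop_eq_getElem_cons (by omega)
    have hpr0 : pvRow l i = l[i] := by simp [pvRow, List.getElem?_eq_getElem (show i < l.length by omega)]
    have hpr1 : pvRow l (i+1) = l[i+1] := by simp [pvRow, List.getElem?_eq_getElem hi1]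
    by_cases hc : pvClose l i = true
    · -- adjacency true at i
      have hrun : pvFindRunEnd (pvAdjL l) i = pvFindRunEnd (pvAdjL l) (i+1) := by
        rw [pvFindRunEnd]
        simp [hadjlen, hgi, hc]
      have hege : i + 1 ≤ pvFindRunEnd (pvAdjL l) (i+1) := pvFindRunEnd_ge _ _
      have hscan : pvScan l (pvAdjL l) i =
          PySem.List.slice l (some (i : Int)) (some ((pvFindRunEnd (pvAdjL l) i : Int) + 1)) ::
            pvScan l (pvAdjL l) (pvFindRunEnd (pvAdjL l) i) := by
        rw [pvScan]
        simp [hadjlen, hgi, hc]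
      constructor
      · -- G
        rw [pvF]
        simp only [dif_pos hilt, hc, if_true, if_pos rfl]
        rw [ihH [pvRow l i, pvRow l (i+1)] (by simp)]
        rw [hscan, hrun, pv_slice_nat]
        congr 1
        rw [hpr0, hpr1, show i+1+1 = i+2 from rfl, hrow0, hrow1]
        rw [show pvFindRunEnd (pvAdjL l) (i+1) + 1 - i
              = (pvFindRunEnd (pvAdjL l) (i+1) + 1 - (i+2)) + 1 + 1 from by omega]
        rw [List.take_succ_cons, List.take_succ_cons]
        simp only [List.cons_append, List.nil_append]
      · -- H
        intro c hcl
        rw [pvF]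
        have hcne : ¬ c = [] := by intro h; subst h; simp at hcl
        simp only [dif_pos hilt, hc, if_true, if_neg hcne]
        rw [ihH (c ++ [pvRow l (i+1)]) (by simp; omega)]
        rw [hrun]
        congr 1
        rw [hpr1, show i+1+1 = i+2 from rfl, hrow1]
        rw [show pvFindRunEnd (pvAdjL l) (i+1) + 1 - (i+1)
              = (pvFindRunEnd (pvAdjL l) (i+1) + 1 - (i+2)) + 1 from by omega]
        rw [List.take_succ_cons]
        simp only [List.append_assoc, List.cons_append, List.nil_append]
    · -- adjacency false at i
      have hcf : pvClose l i = false := by simpa using hc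
      have hrun : pvFindRunEnd (pvAdjL l) i = i := by
        rw [pvFindRunEnd]
        simp [hadjlen, hgi, hcf]
      have hscan : pvScan l (pvAdjL l) i = pvScan l (pvAdjL l) (i+1) := by
        rw [pvScan]
        simp [hadjlen, hgi, hcf]
      constructor
      · rw [pvF]
        simp only [dif_pos hilt, hcf, Bool.false_eq_true, if_false]
        rw [hscan, ihG]
        simp
      · intro c hcl
        rw [pvF]
        simp only [dif_pos hilt, hcf, Bool.false_eq_true, if_false,
          if_pos (show 1 < c.length from by omega)]
        rw [ihG, hrun, show i + 1 - (i + 1) = 0 from by omega]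
        simp only [List.take_zero, List.append_nil]
        rw [hscan]
        simp only [List.singleton_append]


-- ===== VERDICT (by name: the statement is the Claim_ definition above) =====
theorem analyze_time_diff_spec : Claim_equal_analyze_time_diff := by
  intro data _hdom hpre
  unfold Spec_analyze_time_diff
  cases data with
  | none => rfl
  | some l =>
    obtain ⟨hne, hrows⟩ := hpre
    have hlpos : 0 < l.length := List.length_pos_iff.mpr hne
    by_cases hone : l.length = 1
    · -- single-element list: no pairs, both return some []
      obtain ⟨x, rfl⟩ := List.length_eq_one_iff.mp hone
      simp only [analyze_time_diff, analyze_time_diff_alt]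
      norm_num [pvMapO]
      rw [pvScan]
      simp
    · have h2 : 2 ≤ l.length := by omega
      have hOk : ∀ j, j < l.length → pvToMin (pvRow l j) = some (pvT l j) :=
        fun j hj => pv_hOk l (hrows h2) j hj
      set n1 := l.length - 1 with hn1def
      have hn1 : n1 + 1 = l.length := by omega
      -- A side
      have hA := pv_foldA l hOk n1 hn1 n1 0 [] [] (by omega)
      rw [show List.range' 0 n1 = List.range n1 from List.range_eq_range'.symm] at hA
      -- B side
      have hB : pvMapO (pvAdj? l) (List.range n1) = some (pvAdjL l) := by
        rw [pv_mapO l _ (fun i hi => pv_adj_some l hOk i (by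
          have := List.mem_range.mp hi; omega))]
        rfl
      obtain ⟨hG, _⟩ := pv_GH l n1 hn1 n1 0 (by omega) (by omega)
      simp only [analyze_time_diff, analyze_time_diff_alt, show ¬ l.length = 0 by omega,
        if_neg, hn1def] at *
      rcases hres : (List.range (l.length - 1)).foldl (pvStepA l) (some ([], [])) with _ | ⟨g, c⟩
      · rw [hres] at hA; simp [pvAssemble] at hA
      · rw [hres] at hA
        simp only [pvAssemble, List.nil_append] at hA
        rw [hB]
        simp only [Option.some.injEq] at hA ⊢
        rw [hA, hG]
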